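-- pv_equiv track=rewrite | github.com/a2zdialerai-bit/a2z-backend | post_call_processor.py | get_disposition_from_transcript
-- ===== SOURCE A (Python) =====
-- def get_disposition_from_transcript(transcript: dict) -> str:
--     """Infer disposition from transcript data."""
--     turns = transcript.get("turns", [])
--     nodes_visited = transcript.get("nodes_visited", [])
--
--     # Check nodes visited for exit types
--     if any("opt_out" in n for n in nodes_visited):
--         return "opted_out"
--     if any("wrong_number" in n for n in nodes_visited):
--         return "wrong_number"
--     if any("callback" in n for n in nodes_visited):
--         return "callback_scheduled"
--     if any("booked" in n or "close" in n for n in nodes_visited):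
--         return "booked_appointment"
--     if any("polite_no" in n or "not_interested" in n for n in nodes_visited):
--         return "not_interested"
--     if any("sold" in n for n in nodes_visited):
--         return "not_interested"
--
--     return "not_interested"
-- ===== SOURCE B (Python) =====
-- def get_disposition_from_transcript(transcript: dict) -> str:
--     """Infer disposition from transcript data (single pass over nodes_visited)."""
--     opted = wrong = cb = booked = False
--     for n in transcript.get("nodes_visited", []):
--         opted = opted or "opt_out" in n
--         wrong = wrong or "wrong_number" in n
--         cb = cb or "callback" in n
--         booked = booked or "booked" in n or "close" in n
--     if opted:
--         return "opted_out"
--     if wrong: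
--         return "wrong_number"
--     if cb:
--         return "callback_scheduled"
--     if booked:
--         return "booked_appointment"
--     return "not_interested"
-- ===== Notes on version B (the rewrite author's own statement) =====
-- stated objective: alternative
-- what changed: B makes a single pass over nodes_visited accumulating four boolean flags and decides by priority after the loop, instead of A's six separate any()-scans of the list; the three categories that all map to 'not_interested' collapse into the default.
import Mathlib
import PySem

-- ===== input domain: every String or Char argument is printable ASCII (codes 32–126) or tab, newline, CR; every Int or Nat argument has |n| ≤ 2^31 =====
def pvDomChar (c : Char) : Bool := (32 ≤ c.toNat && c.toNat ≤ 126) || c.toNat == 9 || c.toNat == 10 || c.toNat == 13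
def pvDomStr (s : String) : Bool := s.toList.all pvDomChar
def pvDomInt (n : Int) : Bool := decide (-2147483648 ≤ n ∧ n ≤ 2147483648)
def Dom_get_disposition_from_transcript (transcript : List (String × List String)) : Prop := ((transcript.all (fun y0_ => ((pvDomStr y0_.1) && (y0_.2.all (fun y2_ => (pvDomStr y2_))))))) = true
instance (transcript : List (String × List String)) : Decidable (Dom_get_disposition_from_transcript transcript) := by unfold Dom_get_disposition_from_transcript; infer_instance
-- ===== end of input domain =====

-- ===== PORT A =====
-- A: six sequential any()-scans of nodes_visited, in priority order.
def get_disposition_from_transcript (transcript : List (String × List String)) : String :=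
  let d := PySem.Dict.mk transcript
  let _turns := d.getD "turns" []
  let nodes_visited := d.getD "nodes_visited" []
  if nodes_visited.any (fun n => PySem.Str.isIn "opt_out" n) then "opted_out"
  else if nodes_visited.any (fun n => PySem.Str.isIn "wrong_number" n) then "wrong_number"
  else if nodes_visited.any (fun n => PySem.Str.isIn "callback" n) then "callback_scheduled"
  else if nodes_visited.any (fun n => PySem.Str.isIn "booked" n || PySem.Str.isIn "close" n) then "booked_appointment"
  else if nodes_visited.any (fun n => PySem.Str.isIn "polite_no" n || PySem.Str.isIn "not_interested" n) then "not_interested"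
  else if nodes_visited.any (fun n => PySem.Str.isIn "sold" n) then "not_interested"
  else "not_interested"

-- ===== PORT B =====
-- B: ONE pass over nodes_visited accumulating four flags, then a priority decision.
def get_disposition_from_transcript_alt (transcript : List (String × List String)) : String :=
  let flags := ((PySem.Dict.mk transcript).getD "nodes_visited" []).foldl
    (fun (s : Bool × Bool × Bool × Bool) n =>
      (s.1 || PySem.Str.isIn "opt_out" n,
       s.2.1 || PySem.Str.isIn "wrong_number" n,
       s.2.2.1 || PySem.Str.isIn "callback" n,
       s.2.2.2 || PySem.Str.isIn "booked" n || PySem.Str.isIn "close" n))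
    (false, false, false, false)
  if flags.1 then "opted_out"
  else if flags.2.1 then "wrong_number"
  else if flags.2.2.1 then "callback_scheduled"
  else if flags.2.2.2 then "booked_appointment"
  else "not_interested"

-- ===== PRECONDITION & SPEC =====
def Spec_get_disposition_from_transcript (transcript : List (String × List String)) (out : String) : Prop := out = get_disposition_from_transcript_alt transcript
instance (transcript : List (String × List String)) (out : String) : Decidable (Spec_get_disposition_from_transcript transcript out) := by unfold Spec_get_disposition_from_transcript; infer_instance

-- ===== CLAIM (what is proved, stated in full; the proofs are below) =====
def Claim_equal_get_disposition_from_transcript : Prop := ∀ (transcript : List (String × List String)), Dom_get_disposition_from_transcript transcript → Spec_get_disposition_from_transcript transcript (get_disposition_from_transcript transcript)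

-- ===== LEMMAS AND PROOFS =====

-- ===== VERDICT (by name: the statement is the Claim_ definition above) =====
-- The flag-collecting fold computes the disjunction of each predicate over the list.
theorem flags_fold_eq (p1 p2 p3 p4 : String → Bool) (l : List String)
    (a b c d : Bool) :
    l.foldl (fun (s : Bool × Bool × Bool × Bool) n =>
      (s.1 || p1 n, s.2.1 || p2 n, s.2.2.1 || p3 n, s.2.2.2 || p4 n)) (a, b, c, d)
    = (a || l.any p1, b || l.any p2, c || l.any p3, d || l.any p4) := by
  induction l generalizing a b c d with
  | nil => simp
  | cons x xs ih => simp [List.foldl_cons, ih, Bool.or_assoc]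

theorem get_disposition_from_transcript_spec : Claim_equal_get_disposition_from_transcript := by
  intro transcript _
  unfold Spec_get_disposition_from_transcript
  unfold get_disposition_from_transcript get_disposition_from_transcript_alt
  simp only [Bool.or_assoc, flags_fold_eq, Bool.false_or]
  split_ifs <;> rfl
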